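-- pv_equiv track=rewrite | github.com/kaifanxieve/draft99 | 0/1/kfx_code.py | run_traj
-- ===== SOURCE A (Python) =====
-- def run_traj(initial, pattern, mod):
--     """Generate trajectory from initial state using step pattern."""
--     traj = [initial]
--     cur = initial
--     for s in pattern:
--         b, p = cur
--         cur = (b, (p + 1) % mod) if s == "R1" else (1 - b, (p - 1) % mod)
--         traj.append(cur)
--     return traj
-- ===== SOURCE B (Python) =====
-- def run_traj(initial, pattern, mod):
--     """Prefix-table re-implementation: one pass builds cumulative (offset, flip-count),
--     a second pass maps each prefix to its state."""
--     b0, p0 = initial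
--     pre = []
--     off = 0
--     fl = 0
--     for s in pattern:
--         if s == "R1":
--             off += 1
--         else:
--             off -= 1
--             fl += 1
--         pre.append((off, fl))
--     return [initial] + [((b0 if f % 2 == 0 else 1 - b0), (p0 + o) % mod) for o, f in pre]
-- ===== Notes on version B (the rewrite author's own statement) =====
-- stated objective: alternative
-- what changed: Replaces A's single state-carrying loop (each step derived from the previous tuple) by a two-pass prefix-table strategy: one pass accumulates cumulative (offset, flip-count) pairs, a second pass maps each prefix directly to its state from the initial tuple.
import Mathlib
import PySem

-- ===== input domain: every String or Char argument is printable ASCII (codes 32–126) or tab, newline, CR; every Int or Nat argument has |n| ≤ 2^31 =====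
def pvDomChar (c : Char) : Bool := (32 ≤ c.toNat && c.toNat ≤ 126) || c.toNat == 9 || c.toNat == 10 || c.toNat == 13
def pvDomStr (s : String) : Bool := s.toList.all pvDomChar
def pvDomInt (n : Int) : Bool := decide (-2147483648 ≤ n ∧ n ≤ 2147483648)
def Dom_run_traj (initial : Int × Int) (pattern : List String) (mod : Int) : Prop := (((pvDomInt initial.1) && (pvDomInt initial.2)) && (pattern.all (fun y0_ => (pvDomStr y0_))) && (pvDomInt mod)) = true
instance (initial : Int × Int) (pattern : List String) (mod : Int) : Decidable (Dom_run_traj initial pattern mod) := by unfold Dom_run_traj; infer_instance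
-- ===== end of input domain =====

-- B replaces A's state-carrying loop by a prefix table (cumulative offset/flip-count) plus a map; objective: alternative decomposition, same cost.

-- ===== PORT A =====
-- loop 'for s in pattern' carrying (traj, cur); traj.append(cur) = traj ++ [cur]
def run_traj (initial : Int × Int) (pattern : List String) (mod : Int) : List (Int × Int) :=
  (pattern.foldl (fun (st : List (Int × Int) × (Int × Int)) s =>
      let cur := if s == "R1" then (st.2.1, PySem.Int.mod (st.2.2 + 1) mod)
                 else (1 - st.2.1, PySem.Int.mod (st.2.2 - 1) mod)
      (st.1 ++ [cur], cur)) ([initial], initial)).1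

-- ===== PORT B =====
-- first pass of Source B: build the list of cumulative (offset, flip-count) prefixes
def prefTable (pattern : List String) (off fl : Int) : List (Int × Int) :=
  match pattern with
  | [] => []
  | s :: rest =>
    if s == "R1" then (off + 1, fl) :: prefTable rest (off + 1) fl
    else (off - 1, fl + 1) :: prefTable rest (off - 1) (fl + 1)

-- second pass of Source B: [initial] + the comprehension mapping each prefix to its state
def run_traj_alt (initial : Int × Int) (pattern : List String) (mod : Int) : List (Int × Int) :=
  [initial] ++ (prefTable pattern 0 0).map (fun of =>
    ((if PySem.Int.mod of.2 2 == 0 then initial.1 else 1 - initial.1),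
     PySem.Int.mod (initial.2 + of.1) mod))

-- ===== PRECONDITION & SPEC =====
-- A raises ZeroDivisionError when mod = 0 and the pattern is non-empty; exactly those inputs are excluded.
def Pre_run_traj (initial : Int × Int) (pattern : List String) (mod : Int) : Prop :=
  mod ≠ 0 ∨ pattern = []
instance (initial : Int × Int) (pattern : List String) (mod : Int) : Decidable (Pre_run_traj initial pattern mod) := by unfold Pre_run_traj; infer_instance
def pvWitness_run_traj : (Int × Int) × List String × Int := ((0, 0), ["R1", "L1"], 3)
def Spec_run_traj (initial : Int × Int) (pattern : List String) (mod : Int) (out : List (Int × Int)) : Prop := out = run_traj_alt initial pattern mod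
instance (initial : Int × Int) (pattern : List String) (mod : Int) (out : List (Int × Int)) : Decidable (Spec_run_traj initial pattern mod out) := by unfold Spec_run_traj; infer_instance

-- ===== CLAIM (what is proved, stated in full; the proofs are below) =====
def Claim_equal_run_traj : Prop := ∀ (initial : Int × Int) (pattern : List String) (mod : Int), Dom_run_traj initial pattern mod → Pre_run_traj initial pattern mod → Spec_run_traj initial pattern mod (run_traj initial pattern mod)

-- ===== LEMMAS AND PROOFS =====

-- mod absorbs an already-reduced summand (Python semantics)
theorem pymod_add (a b m : Int) (h : m ≠ 0) :
    PySem.Int.mod (PySem.Int.mod a m + b) m = PySem.Int.mod (a + b) m := by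
  simp [PySem.Int.mod]

-- the prefix table with non-zero start is the zero-start table shifted
theorem prefTable_shift (pattern : List String) (off fl : Int) :
    prefTable pattern off fl = (prefTable pattern 0 0).map (fun e => (e.1 + off, e.2 + fl)) := by
  induction pattern generalizing off fl with
  | nil => simp [prefTable]
  | cons s rest ih =>
    by_cases hs : s == "R1"
    · simp only [prefTable, hs, if_true, List.map_cons, List.cons.injEq]
      rw [ih (off + 1) fl, ih (0 + 1) 0, List.map_map]
      refine ⟨by rw [Prod.ext_iff]; constructor <;> ring, List.map_congr_left ?_⟩
      intro e _; rw [Prod.ext_iff]; constructor <;> simp [Function.comp] <;> ring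
    · simp only [prefTable, hs, if_false, List.map_cons, List.cons.injEq,
        Bool.false_eq_true]
      rw [ih (off - 1) (fl + 1), ih (0 - 1) (0 + 1), List.map_map]
      refine ⟨by rw [Prod.ext_iff]; constructor <;> ring, List.map_congr_left ?_⟩
      intro e _; rw [Prod.ext_iff]; constructor <;> simp [Function.comp] <;> ring

-- A's fold equals B's mapped prefix table, for any carried state
theorem fold_eq (mod : Int) (hm : mod ≠ 0) (pattern : List String)
    (acc : List (Int × Int)) (b p : Int) :
    (pattern.foldl (fun (st : List (Int × Int) × (Int × Int)) s =>
        let cur := if s == "R1" then (st.2.1, PySem.Int.mod (st.2.2 + 1) mod)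
                   else (1 - st.2.1, PySem.Int.mod (st.2.2 - 1) mod)
        (st.1 ++ [cur], cur)) (acc, (b, p))).1
    = acc ++ (prefTable pattern 0 0).map (fun of =>
        ((if PySem.Int.mod of.2 2 == 0 then b else 1 - b),
         PySem.Int.mod (p + of.1) mod)) := by
  induction pattern generalizing acc b p with
  | nil => simp [prefTable]
  | cons s rest ih =>
    by_cases hs : s == "R1"
    · simp only [List.foldl_cons, hs, if_true]
      rw [ih, show prefTable (s :: rest) 0 0 = (0 + 1, 0) :: prefTable rest (0 + 1) 0 by
            simp [prefTable, hs],
          prefTable_shift rest (0 + 1) 0, List.map_cons, List.map_map,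
          List.append_assoc, List.singleton_append]
      apply congrArg (fun t => acc ++ t)
      rw [List.cons_eq_cons]
      refine ⟨?_, List.map_congr_left fun e he => ?_⟩
      · rw [Prod.ext_iff]
        exact ⟨by rw [if_pos (by decide)], by rw [show p + 1 = p + (0 + 1) by ring]⟩
      · simp only [Function.comp_apply]
        rw [pymod_add _ _ _ hm, Prod.ext_iff]
        exact ⟨by norm_num, by rw [show p + 1 + e.1 = p + (e.1 + (0 + 1)) by ring]⟩
    · rw [Bool.not_eq_true] at hs
      simp only [List.foldl_cons, hs, Bool.false_eq_true, if_false]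
      rw [ih, show prefTable (s :: rest) 0 0 = (0 - 1, 0 + 1) :: prefTable rest (0 - 1) (0 + 1) by
            simp [prefTable, hs],
          prefTable_shift rest (0 - 1) (0 + 1), List.map_cons, List.map_map,
          List.append_assoc, List.singleton_append]
      apply congrArg (fun t => acc ++ t)
      rw [List.cons_eq_cons]
      refine ⟨?_, List.map_congr_left fun e he => ?_⟩
      · rw [Prod.ext_iff]
        exact ⟨by rw [if_neg (by decide)], by rw [show p - 1 = p + (0 - 1) by ring]⟩
      · simp only [Function.comp_apply]
        rw [pymod_add _ _ _ hm, Prod.ext_iff]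
        constructor
        · by_cases he : (2 : Int) ∣ e.2
          · simp [he, show ¬ (2 : Int) ∣ (e.2 + 1) by omega]
          · simp [he, show (2 : Int) ∣ (e.2 + 1) by omega]
        · rw [show p - 1 + e.1 = p + (e.1 + (0 - 1)) by ring]

-- ===== VERDICT (by name: the statement is the Claim_ definition above) =====
theorem run_traj_spec : Claim_equal_run_traj := by
  intro initial pattern mod _ hpre
  rcases hpre with hm | hp
  · show _ = _
    unfold run_traj run_traj_alt
    rw [show initial = (initial.1, initial.2) from rfl, fold_eq mod hm]
  · subst hp
    rfl
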